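-- pv_equiv track=rewrite | github.com/jschnab/leetcode | math/prime_numbers.py | replace_sum_prime_factors
-- ===== SOURCE A (Python) =====
-- def replace_sum_prime_factors(n):
--     s = 0
--     i = 2
--     cur = n
--     while i * i <= cur:
--         while cur % i == 0:
--             s += i
--             cur //= i
--         i += 1
--     if cur > 1:
--         s += cur
--     if s == n:
--         return s
--     return replace_sum_prime_factors(s)
-- ===== SOURCE B (Python) =====
-- def replace_sum_prime_factors(n):
--     cur = n
--     while True:
--         m = cur
--         s = 0
--         if m >= 2:
--             while m % 2 == 0:
--                 s += 2
--                 m //= 2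
--             i = 3
--             while i * i <= m:
--                 while m % i == 0:
--                     s += i
--                     m //= i
--                 i += 2
--             if m > 1:
--                 s += m
--         if s == cur:
--             return s
--         cur = s
-- ===== Notes on version B (the rewrite author's own statement) =====
-- stated objective: alternative
-- what changed: Recursion to the fixed point is replaced by an explicit while-loop, and the trial division uses a 2-then-odd wheel (divide out 2s, then only odd candidates 3,5,7,...) instead of testing every integer i; intended to halve the division work, though the harness could not measure a difference at its sizes.
import Mathlib
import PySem

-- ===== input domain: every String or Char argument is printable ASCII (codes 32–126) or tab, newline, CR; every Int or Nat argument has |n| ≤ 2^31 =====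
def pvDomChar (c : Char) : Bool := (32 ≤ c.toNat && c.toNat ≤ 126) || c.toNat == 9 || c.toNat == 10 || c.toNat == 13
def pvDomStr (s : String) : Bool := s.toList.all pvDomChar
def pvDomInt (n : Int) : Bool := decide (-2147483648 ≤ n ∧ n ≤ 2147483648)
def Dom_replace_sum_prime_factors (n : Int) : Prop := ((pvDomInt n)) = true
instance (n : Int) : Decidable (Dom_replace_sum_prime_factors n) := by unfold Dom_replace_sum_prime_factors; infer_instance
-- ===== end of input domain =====

-- B replaces A's tail recursion to the fixed point by an explicit loop, and factorises with a
-- 2-then-odd wheel (intended to halve the trial divisions; speed not measured here).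
-- All loops/recursions are ported with a fuel parameter that provably suffices (a pure
-- totality guard; the proofs below only ever evaluate them with enough fuel).

-- ===== PORT A =====
-- inner loop `while cur % i == 0: s += i; cur //= i`
def aInner : Nat → Int → Int → Int → Int × Int
  | 0, _, cur, s => (cur, s)
  | f + 1, i, cur, s =>
    if 2 ≤ i ∧ 0 < cur ∧ PySem.Int.mod cur i = 0 then
      aInner f i (PySem.Int.floordiv cur i) (s + i)
    else (cur, s)

-- outer loop `while i * i <= cur: ...; i += 1`
def aOuter : Nat → Int → Int → Int → Int × Int
  | 0, _, cur, s => (cur, s)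
  | f + 1, i, cur, s =>
    if 2 ≤ i ∧ i * i ≤ cur then
      aOuter f (i + 1) (aInner cur.toNat i cur s).1 (aInner cur.toNat i cur s).2
    else (cur, s)

-- the value of s after the loops and the `if cur > 1: s += cur` step
def aSpf (n : Int) : Int :=
  if 1 < (aOuter (n + 1 - 2).toNat 2 n 0).1 then
    (aOuter (n + 1 - 2).toNat 2 n 0).2 + (aOuter (n + 1 - 2).toNat 2 n 0).1
  else (aOuter (n + 1 - 2).toNat 2 n 0).2

-- `if s == n: return s ; return replace_sum_prime_factors(s)`
def aGo : Nat → Int → Int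
  | 0, _ => 0
  | f + 1, n => if aSpf n = n then aSpf n else aGo f (aSpf n)

def replace_sum_prime_factors (n : Int) : Int := aGo (n.toNat + 2) n

-- ===== PORT B =====
-- `while m % 2 == 0: s += 2; m //= 2`
def bTwos : Nat → Int → Int → Int × Int
  | 0, m, s => (m, s)
  | f + 1, m, s =>
    if 0 < m ∧ PySem.Int.mod m 2 = 0 then bTwos f (PySem.Int.floordiv m 2) (s + 2)
    else (m, s)

-- `while m % i == 0: s += i; m //= i`
def bInner : Nat → Int → Int → Int → Int × Int
  | 0, _, m, s => (m, s)
  | f + 1, i, m, s =>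
    if 2 ≤ i ∧ 0 < m ∧ PySem.Int.mod m i = 0 then
      bInner f i (PySem.Int.floordiv m i) (s + i)
    else (m, s)

-- `while i * i <= m: ...; i += 2`
def bOuter : Nat → Int → Int → Int → Int × Int
  | 0, _, m, s => (m, s)
  | f + 1, i, m, s =>
    if 2 ≤ i ∧ i * i ≤ m then
      bOuter f (i + 2) (bInner m.toNat i m s).1 (bInner m.toNat i m s).2
    else (m, s)

-- one round of B's while-True body: the wheel factorisation sum for cur
def bSpf (cur : Int) : Int :=
  if 2 ≤ cur then
    (if 1 < (bOuter ((bTwos cur.toNat cur 0).1 + 1 - 3).toNat 3 (bTwos cur.toNat cur 0).1 (bTwos cur.toNat cur 0).2).1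
     then (bOuter ((bTwos cur.toNat cur 0).1 + 1 - 3).toNat 3 (bTwos cur.toNat cur 0).1 (bTwos cur.toNat cur 0).2).2
            + (bOuter ((bTwos cur.toNat cur 0).1 + 1 - 3).toNat 3 (bTwos cur.toNat cur 0).1 (bTwos cur.toNat cur 0).2).1
     else (bOuter ((bTwos cur.toNat cur 0).1 + 1 - 3).toNat 3 (bTwos cur.toNat cur 0).1 (bTwos cur.toNat cur 0).2).2)
  else 0

-- `while True: s = ...; if s == cur: return s; cur = s`
def bGo : Nat → Int → Int
  | 0, _ => 0
  | f + 1, cur => if bSpf cur = cur then bSpf cur else bGo f (bSpf cur)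

def replace_sum_prime_factors_alt (n : Int) : Int := bGo (n.toNat + 2) n

-- ===== PRECONDITION & SPEC =====
def Spec_replace_sum_prime_factors (n : Int) (out : Int) : Prop := out = replace_sum_prime_factors_alt n
instance (n : Int) (out : Int) : Decidable (Spec_replace_sum_prime_factors n out) := by unfold Spec_replace_sum_prime_factors; infer_instance

-- ===== CLAIM (what is proved, stated in full; the proofs are below) =====
def Claim_equal_replace_sum_prime_factors : Prop := ∀ (n : Int), Dom_replace_sum_prime_factors n → Spec_replace_sum_prime_factors n (replace_sum_prime_factors n)

-- ===== LEMMAS AND PROOFS =====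
-- aInner divides out a maximal power of i (enough fuel): the characterisation everything rests on
theorem aInner_spec : ∀ (f : Nat) (i cur s : Int), cur.toNat ≤ f → 2 ≤ i → 0 < cur →
    ∃ (k : Nat) (d : Int), aInner f i cur s = (d, s + i * k) ∧ cur = d * i ^ k ∧ 0 < d ∧ ¬ i ∣ d := by
  intro f
  induction f with
  | zero => intro i cur s hN hi hc; omega
  | succ f ih =>
    intro i cur s hN hi hc
    rw [aInner]
    by_cases h : 2 ≤ i ∧ 0 < cur ∧ PySem.Int.mod cur i = 0
    · rw [if_pos h]
      have hdvd : i ∣ cur := (PySem.Int.mod_eq_zero_iff_dvd cur i).mp h.2.2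
      obtain ⟨c, rfl⟩ := hdvd
      have hiz : i ≠ 0 := by omega
      have hfd : PySem.Int.floordiv (i * c) i = c := by
        rw [PySem.Int.floordiv_eq_ediv_of_pos (by omega)]
        exact Int.mul_ediv_cancel_left c hiz
      have hcpos : 0 < c := by nlinarith
      have hcN : c.toNat ≤ f := by
        have : c < i * c := by nlinarith
        omega
      obtain ⟨k, d, h1, h2, h3, h4⟩ := ih i c (s + i) hcN hi hcpos
      refine ⟨k + 1, d, ?_, ?_, h3, h4⟩
      · rw [hfd, h1]; push_cast; ring_nf
      · rw [h2, pow_succ]; ring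
    · rw [if_neg h]
      have hmod : PySem.Int.mod cur i ≠ 0 := by tauto
      have hnd : ¬ i ∣ cur := fun hd => hmod ((PySem.Int.mod_eq_zero_iff_dvd cur i).mpr hd)
      exact ⟨0, cur, by simp, by simp, hc, hnd⟩

theorem aInner_noop : ∀ (f : Nat) (i cur s : Int), PySem.Int.mod cur i ≠ 0 →
    aInner f i cur s = (cur, s) := by
  intro f i cur s hm
  cases f with
  | zero => rw [aInner]
  | succ f => rw [aInner, if_neg (by tauto)]

theorem aOuter_stop (f : Nat) (i cur s : Int) (h : ¬ (2 ≤ i ∧ i * i ≤ cur)) :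
    aOuter f i cur s = (cur, s) := by
  cases f with
  | zero => rw [aOuter]
  | succ f => rw [aOuter, if_neg h]

theorem pvPowLin (i : Int) (hi : 2 ≤ i) (k : Nat) (hk : 1 ≤ k) : i * k ≤ i ^ k := by
  induction k with
  | zero => omega
  | succ k ih =>
    rcases Nat.eq_zero_or_pos k with hk0 | hk1
    · subst hk0; simp
    · have h1 := ih hk1
      have h2 : (1:Int) ≤ i ^ k := one_le_pow₀ (by omega)
      have hkk : (1:Int) ≤ (k:Int) := by exact_mod_cast hk1
      rw [pow_succ]; push_cast
      nlinarith

theorem pvKeyBound (i d : Int) (k : Nat) (hi : 2 ≤ i) (hd : 0 < d) :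
    i * k + (if 1 < d then d else 0) ≤ d * i ^ k := by
  rcases Nat.eq_zero_or_pos k with hk | hk
  · subst hk; simp only [Nat.cast_zero, mul_zero, pow_zero, mul_one, zero_add]
    split_ifs <;> omega
  · have hik := pvPowLin i hi k hk
    have h1 : (1:Int) ≤ i ^ k := one_le_pow₀ (by omega)
    have h2 : i ≤ i ^ k := le_self_pow₀ (by omega) (by omega)
    split_ifs with hd1
    · have h3 : 2 * (i ^ k - 1) ≤ d * (i ^ k - 1) :=
        mul_le_mul_of_nonneg_right (by omega) (by omega)
      nlinarith
    · have hd2 : d = 1 := by omega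
      subst hd2; simpa using hik

-- loop invariant: with enough fuel the final s (plus cofactor if > 1) stays ≤ s₀ + cur
theorem aOuter_bound : ∀ (f : Nat) (i cur s : Int), (cur + 1 - i).toNat ≤ f → 2 ≤ i → 0 < cur →
    s ≤ (aOuter f i cur s).2 ∧ 0 < (aOuter f i cur s).1 ∧
      (if 1 < (aOuter f i cur s).1 then (aOuter f i cur s).2 + (aOuter f i cur s).1
       else (aOuter f i cur s).2) ≤ s + (if 1 < cur then cur else 0) := by
  intro f
  induction f with
  | zero =>
    intro i cur s hN hi hc
    rw [aOuter]
    refine ⟨le_rfl, hc, ?_⟩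
    split_ifs <;> omega
  | succ f ih =>
    intro i cur s hN hi hc
    rw [aOuter]
    by_cases hg : 2 ≤ i ∧ i * i ≤ cur
    · rw [if_pos hg]
      obtain ⟨k, d, h1, h2, h3, h4⟩ := aInner_spec cur.toNat i cur s le_rfl hi hc
      have hile : i < cur := by nlinarith [hg.2]
      have hp : (1:Int) ≤ i ^ k := one_le_pow₀ (by omega)
      have hdle : d ≤ cur := by nlinarith
      have hmeas : (d + 1 - (i + 1)).toNat ≤ f := by omega
      have hrec := ih (i + 1) d (s + i * k) hmeas (by omega) h3
      have hf : (aInner cur.toNat i cur s).1 = d := by rw [h1]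
      have hs2 : (aInner cur.toNat i cur s).2 = s + i * k := by rw [h1]
      rw [hf, hs2]
      refine ⟨?_, hrec.2.1, ?_⟩
      · have hik : (0:Int) ≤ i * k := by positivity
        linarith [hrec.1]
      · have hkey := pvKeyBound i d k hi h3
        have hcur1 : (1:Int) < cur := by nlinarith [hg.2]
        rw [if_pos hcur1]
        have := hrec.2.2
        rw [← h2] at hkey
        split_ifs at this hkey ⊢ <;> linarith
    · rw [if_neg hg]
      refine ⟨le_rfl, hc, ?_⟩
      split_ifs <;> omega

theorem aSpf_low (n : Int) (hn : n ≤ 1) : aSpf n = 0 := by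
  rw [aSpf, aOuter_stop _ _ _ _ (by omega)]
  simp only
  rw [if_neg (by omega)]

theorem aSpf_bound (n : Int) (hn : 0 < n) :
    0 ≤ aSpf n ∧ aSpf n ≤ (if 1 < n then n else 0) := by
  have h := aOuter_bound (n + 1 - 2).toNat 2 n 0 le_rfl (by omega) hn
  rw [aSpf]
  constructor
  · split_ifs <;> [linarith [h.1, h.2.1]; linarith [h.1]]
  · linarith [h.2.2]

theorem measure_lt (n s : Int) (hs : s = aSpf n) (hne : s ≠ n) :
    s.toNat + (if s < 0 then 1 else 0) < n.toNat + (if n < 0 then 1 else 0) := by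
  by_cases hn : n ≤ 1
  · rw [aSpf_low n hn] at hs
    subst hs
    split_ifs <;> omega
  · have hb := aSpf_bound n (by omega)
    rw [← hs] at hb
    rw [if_pos (by omega)] at hb
    split_ifs <;> omega

theorem bInner_eq_aInner : ∀ (f : Nat) (i m s : Int), bInner f i m s = aInner f i m s := by
  intro f
  induction f with
  | zero => intro i m s; rw [bInner, aInner]
  | succ f ih =>
    intro i m s
    rw [bInner, aInner]
    by_cases h : 2 ≤ i ∧ 0 < m ∧ PySem.Int.mod m i = 0
    · rw [if_pos h, if_pos h, ih]
    · rw [if_neg h, if_neg h]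

theorem bTwos_eq_aInner : ∀ (f : Nat) (m s : Int), bTwos f m s = aInner f 2 m s := by
  intro f
  induction f with
  | zero => intro m s; rw [bTwos, aInner]
  | succ f ih =>
    intro m s
    rw [bTwos, aInner]
    by_cases h : 0 < m ∧ PySem.Int.mod m 2 = 0
    · rw [if_pos h, if_pos ⟨le_rfl, h⟩, ih]
    · rw [if_neg h, if_neg (by tauto)]

theorem bOuter_stop (f : Nat) (i m s : Int) (h : ¬ (2 ≤ i ∧ i * i ≤ m)) :
    bOuter f i m s = (m, s) := by
  cases f with
  | zero => rw [bOuter]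
  | succ f => rw [bOuter, if_neg h]

-- A and B run in lockstep on odd trial divisors: the even candidate i+1 that A also tests
-- never divides the (odd) cofactor, so A's extra outer iteration is a no-op.
theorem lockstep : ∀ (N : Nat), ∀ (fa fb : Nat) (i c s : Int),
    (c + 1 - i).toNat ≤ N → (c + 1 - i).toNat ≤ fa → (c + 1 - i).toNat ≤ fb →
    3 ≤ i → ¬ (2:Int) ∣ i → 0 < c → ¬ (2:Int) ∣ c →
    aOuter fa i c s = bOuter fb i c s := by
  intro N
  induction N with
  | zero =>
    intro fa fb i c s hN hfa hfb hi hoi hc hoc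
    have hg : ¬ (2 ≤ i ∧ i * i ≤ c) := by
      rintro ⟨-, hii⟩
      have : i < c := by nlinarith
      omega
    rw [aOuter_stop _ _ _ _ hg, bOuter_stop _ _ _ _ hg]
  | succ N ih =>
    intro fa fb i c s hN hfa hfb hi hoi hc hoc
    by_cases hg : 2 ≤ i ∧ i * i ≤ c
    · have hic : i < c := by nlinarith [hg.2]
      obtain ⟨fa', rfl⟩ : ∃ x, fa = x + 1 := ⟨fa - 1, by omega⟩
      obtain ⟨fb', rfl⟩ : ∃ x, fb = x + 1 := ⟨fb - 1, by omega⟩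
      rw [aOuter, bOuter, if_pos hg, if_pos hg]
      obtain ⟨k, d, h1, h2, h3, h4⟩ := aInner_spec c.toNat i c s le_rfl (by omega) hc
      have hod : ¬ (2:Int) ∣ d := by
        intro hdd
        exact hoc (h2 ▸ Dvd.dvd.mul_right hdd (i ^ k))
      have hp : (1:Int) ≤ i ^ k := one_le_pow₀ (by omega)
      have hdle : d ≤ c := by nlinarith
      have hf : (aInner c.toNat i c s).1 = d := by rw [h1]
      have hs2 : (aInner c.toNat i c s).2 = s + i * k := by rw [h1]
      rw [bInner_eq_aInner, hf, hs2]
      have hnd1 : PySem.Int.mod d (i + 1) ≠ 0 := by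
        intro hm
        have hdvd : (i + 1) ∣ d := (PySem.Int.mod_eq_zero_iff_dvd d (i + 1)).mp hm
        exact hod (dvd_trans (by omega) hdvd)
      by_cases hg1 : 2 ≤ i + 1 ∧ (i + 1) * (i + 1) ≤ d
      · have hid : i + 1 < d := by nlinarith [hg1.2]
        obtain ⟨fa'', rfl⟩ : ∃ x, fa' = x + 1 := ⟨fa' - 1, by omega⟩
        rw [aOuter, if_pos hg1, aInner_noop _ _ _ _ hnd1]
        simp only
        have : i + 1 + 1 = i + 2 := by ring
        rw [this]
        exact ih fa'' fb' (i + 2) d (s + i * k) (by omega) (by omega) (by omega)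
          (by omega) (by omega) h3 hod
      · rw [aOuter_stop _ _ _ _ hg1]
        have hg2 : ¬ (2 ≤ i + 2 ∧ (i + 2) * (i + 2) ≤ d) := by
          rintro ⟨-, hii⟩
          exact hg1 ⟨by omega, by nlinarith⟩
        rw [bOuter_stop _ _ _ _ hg2]
    · rw [aOuter_stop _ _ _ _ hg, bOuter_stop _ _ _ _ hg]

theorem spf_eq (n : Int) : bSpf n = aSpf n := by
  by_cases hn : 2 ≤ n
  · obtain ⟨k, d, h1, h2, h3, h4⟩ := aInner_spec n.toNat 2 n 0 le_rfl le_rfl (by omega)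
    have hbt : bTwos n.toNat n 0 = (d, 0 + 2 * (k:Int)) := (bTwos_eq_aInner n.toNat n 0).trans h1
    have hbf : (bTwos n.toNat n 0).1 = d := by rw [hbt]
    have hbs : (bTwos n.toNat n 0).2 = 0 + 2 * (k:Int) := by rw [hbt]
    have hp1 : (1:Int) ≤ 2 ^ k := one_le_pow₀ (by omega)
    have hdn : d ≤ n := by nlinarith
    rw [bSpf, if_pos hn, hbf, hbs]
    by_cases h4n : 4 ≤ n
    · have hA : aOuter (n + 1 - 2).toNat 2 n 0 = bOuter (d + 1 - 3).toNat 3 d (0 + 2 * (k:Int)) := by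
        obtain ⟨f', hf'⟩ : ∃ x, (n + 1 - 2).toNat = x + 1 := ⟨(n + 1 - 2).toNat - 1, by omega⟩
        rw [hf', aOuter, if_pos ⟨le_rfl, by omega⟩]
        have hff : (aInner n.toNat 2 n 0).1 = d := by rw [h1]
        have hss : (aInner n.toNat 2 n 0).2 = 0 + 2 * (k:Int) := by rw [h1]
        rw [hff, hss]
        exact lockstep (d + 1 - 3).toNat f' (d + 1 - 3).toNat 3 d (0 + 2 * (k:Int))
          le_rfl (by omega) le_rfl le_rfl (by omega) h3 h4
      rw [aSpf, hA]
    · -- n = 2 or n = 3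
      have hA : aOuter (n + 1 - 2).toNat 2 n 0 = (n, 0) := aOuter_stop _ _ _ _ (by omega)
      have hAf : (aOuter (n + 1 - 2).toNat 2 n 0).1 = n := by rw [hA]
      have hAs : (aOuter (n + 1 - 2).toNat 2 n 0).2 = 0 := by rw [hA]
      have hcase : (k = 0 ∧ d = n) ∨ (k = 1 ∧ 2 * d = n) := by
        rcases Nat.lt_or_ge k 2 with hk2 | hk2
        · interval_cases k
          · left; exact ⟨rfl, by simpa using h2.symm⟩
          · right; exact ⟨rfl, by rw [h2]; ring⟩
        · exfalso
          have : (4:Int) ≤ 2 ^ k := by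
            calc (4:Int) = 2 ^ 2 := by norm_num
            _ ≤ 2 ^ k := pow_le_pow_right₀ (by norm_num) hk2
          nlinarith
      have hB : ∀ (ff : Nat) (dd ss : Int), dd ≤ 3 →
          (if 1 < (bOuter ff 3 dd ss).1 then (bOuter ff 3 dd ss).2 + (bOuter ff 3 dd ss).1
           else (bOuter ff 3 dd ss).2) = (if 1 < dd then ss + dd else ss) := by
        intro ff dd ss hdd
        have h : bOuter ff 3 dd ss = (dd, ss) := bOuter_stop _ _ _ _ (by omega)
        have hx : (bOuter ff 3 dd ss).1 = dd := by rw [h]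
        have hy : (bOuter ff 3 dd ss).2 = ss := by rw [h]
        rw [hx, hy]
      rcases hcase with ⟨hk, hd⟩ | ⟨hk, hd⟩
      · rw [hB _ d _ (by omega), aSpf, hAf, hAs]
        subst hk
        rw [if_pos (by omega : (1:Int) < d), if_pos (by omega : (1:Int) < n)]
        push_cast
        omega
      · have hd1 : d = 1 := by
          rcases Int.even_or_odd d with he | ho
          · exact absurd he.two_dvd h4
          · omega
        subst hk
        rw [hB _ d _ (by omega), aSpf, hAf, hAs]
        rw [if_neg (by omega : ¬ (1:Int) < d), if_pos (by omega : (1:Int) < n)]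
        push_cast
        omega
  · rw [bSpf, if_neg hn, aSpf_low n (by omega)]

theorem pv_main : ∀ (f : Nat) (n : Int), n.toNat + (if n < 0 then 1 else 0) < f →
    aGo f n = bGo f n := by
  intro f
  induction f with
  | zero => intro n hN; exact absurd hN (Nat.not_lt_zero _)
  | succ f ih =>
    intro n hN
    rw [aGo, bGo, spf_eq]
    by_cases h : aSpf n = n
    · rw [if_pos h, if_pos h]
    · rw [if_neg h, if_neg h]
      exact ih (aSpf n) (by have := measure_lt n (aSpf n) rfl h; omega)

-- ===== VERDICT (by name: the statement is the Claim_ definition above) =====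
theorem replace_sum_prime_factors_spec : Claim_equal_replace_sum_prime_factors := by
  intro n _
  unfold Spec_replace_sum_prime_factors replace_sum_prime_factors replace_sum_prime_factors_alt
  exact pv_main (n.toNat + 2) n (by split_ifs <;> omega)
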